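-- pv_equiv track=rewrite | github.com/oliao28/startup_research | gdrive_qna.py | extract_unique_top_3
-- ===== SOURCE A (Python) =====
-- def extract_unique_top_3(ranked_list):
--     seen = set()
--     result = []
--     for item in ranked_list:
--         if len(result) == 3:
--             break
--         if item not in seen:
--             seen.add(item)
--             result.append(item)
--     return result
-- ===== SOURCE B (Python) =====
-- def extract_unique_top_3(ranked_list):
--     def pick(k, lst):
--         if k == 0 or not lst:
--             return []
--         head = lst[0]
--         return [head] + pick(k - 1, [x for x in lst[1:] if x != head])
--     return pick(3, ranked_list)
-- ===== Notes on version B (the rewrite author's own statement) =====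
-- stated objective: alternative
-- what changed: Replaces the seen-set accumulator loop with a recursive head-and-filter scheme: take the head, then recurse on the tail with all copies of the head filtered out, counting down from 3; no set or result accumulator is kept.
import Mathlib
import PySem

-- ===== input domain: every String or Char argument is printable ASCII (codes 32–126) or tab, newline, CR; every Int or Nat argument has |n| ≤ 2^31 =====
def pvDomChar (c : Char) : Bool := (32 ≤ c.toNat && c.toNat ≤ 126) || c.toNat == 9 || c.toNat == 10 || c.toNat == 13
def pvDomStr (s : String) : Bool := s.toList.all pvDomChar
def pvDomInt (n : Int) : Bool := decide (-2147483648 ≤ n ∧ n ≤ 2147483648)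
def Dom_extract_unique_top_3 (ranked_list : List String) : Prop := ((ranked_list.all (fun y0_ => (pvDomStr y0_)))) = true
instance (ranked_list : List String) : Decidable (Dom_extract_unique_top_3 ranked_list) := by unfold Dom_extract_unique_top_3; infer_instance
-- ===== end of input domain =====

-- ===== PORT A =====
-- loop: 'for item in ranked_list' with state (seen, result), 'break' when len(result) == 3
def extractLoop : List String → PySem.Set String → List String → List String
  | [], _, result => result
  | item :: rest, seen, result =>
    if result.length == 3 then result
    else if !(PySem.Set.contains seen item) then
      extractLoop rest (PySem.Set.add seen item) (result ++ [item])
    else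
      extractLoop rest seen result

def extract_unique_top_3 (ranked_list : List String) : List String :=
  extractLoop ranked_list PySem.Set.empty []

-- ===== PORT B =====
-- B: recursive head-and-filter: emit lst[0], recurse on the tail with copies of the head filtered out, k counting down from 3
def pickRec : Nat → List String → List String
  | 0, _ => []
  | _ + 1, [] => []
  | k + 1, head :: rest => head :: pickRec k (rest.filter (fun x => x != head))

def extract_unique_top_3_alt (ranked_list : List String) : List String :=
  pickRec 3 ranked_list

-- ===== PRECONDITION & SPEC =====
def Spec_extract_unique_top_3 (ranked_list : List String) (out : List String) : Prop := out = extract_unique_top_3_alt ranked_list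
instance (ranked_list : List String) (out : List String) : Decidable (Spec_extract_unique_top_3 ranked_list out) := by unfold Spec_extract_unique_top_3; infer_instance

-- ===== CLAIM =====
def Claim_equal_extract_unique_top_3 : Prop := ∀ (ranked_list : List String), Dom_extract_unique_top_3 ranked_list → Spec_extract_unique_top_3 ranked_list (extract_unique_top_3 ranked_list)

-- ===== LEMMAS AND PROOFS =====

-- A's loop with seen = result (the Set is its element list) equals res ++ B's recursion,
-- run for the 3 - |res| remaining slots on the tail with the already-taken items filtered out.
theorem pv_loop_eq (xs : List String) : ∀ (k : Nat) (res : List String), res.length + k = 3 →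
    extractLoop xs res res = res ++ pickRec k (xs.filter (fun y => !(res.contains y))) := by
  induction xs with
  | nil => intro k res _; cases k <;> simp [extractLoop, pickRec]
  | cons x xs ih =>
    intro k res hk
    cases k with
    | zero =>
      have h3 : res.length == 3 := by simp; omega
      simp [extractLoop, h3, pickRec]
    | succ k' =>
      have h3 : (res.length == 3) = false := by simp; omega
      by_cases hc : x ∈ res
      · have hstep : extractLoop (x :: xs) res res = extractLoop xs res res := by
          simp [extractLoop, h3, PySem.Set.contains, hc]
        rw [hstep, ih (k' + 1) res hk]
        simp [hc]
      · have hstep : extractLoop (x :: xs) res res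
            = extractLoop xs (res ++ [x]) (res ++ [x]) := by
          simp [extractLoop, h3, PySem.Set.contains, PySem.Set.add, hc]
        have hfl : xs.filter (fun y => !((res ++ [x]).contains y))
            = (xs.filter (fun y => !(res.contains y))).filter (fun y => y != x) := by
          rw [List.filter_filter]
          apply List.filter_congr
          intro a _
          by_cases hax : a = x
          · simp [hax]
          · simp [hax]
        rw [hstep, ih k' (res ++ [x]) (by simp; omega), hfl]
        simp [pickRec, hc, List.filter_filter]

-- ===== VERDICT =====
theorem extract_unique_top_3_spec : Claim_equal_extract_unique_top_3 := by
  intro rl _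
  show extractLoop rl PySem.Set.empty [] = pickRec 3 rl
  have := pv_loop_eq rl 3 [] (by simp)
  simpa [PySem.Set.empty] using this
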